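-- pv_equiv track=rewrite | github.com/dennis0802/uwindsor-courses | comp3710/project1/mlrose_prisoner_hillClimb.py | calculateJailTime
-- ===== SOURCE A (Python) =====
-- def calculateJailTime(player, opponent):
--     playerJailTime = 0
--     opponentJailTime = 0
--     # Use + to avoid confusion while graphing
--     for i in range(len(player)):
--         if(player[i] == opponent[i] and player[i] == 0):
--             playerJailTime += 1
--             opponentJailTime += 1
--         elif(player[i] == opponent[i] and player[i] == 1):
--             playerJailTime += 10
--             opponentJailTime += 10
--         elif(player[i] == 0 and opponent[i] == 1):
--             playerJailTime += 20
--             opponentJailTime += 0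
--         elif(player[i] == 1 and opponent[i] == 0):
--             playerJailTime += 0
--             opponentJailTime += 20
--     return playerJailTime, opponentJailTime
-- ===== SOURCE B (Python) =====
-- def calculateJailTime(player, opponent):
--     # Build the list of move pairs, then score each of the four meaningful
--     # outcomes at once via its occurrence count in a payoff table.
--     pairs = [(player[i], opponent[i]) for i in range(len(player))]
--     table = {(0, 0): (1, 1), (1, 1): (10, 10), (0, 1): (20, 0), (1, 0): (0, 20)}
--     playerJailTime = sum(pairs.count(k) * pen[0] for k, pen in table.items())
--     opponentJailTime = sum(pairs.count(k) * pen[1] for k, pen in table.items())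
--     return playerJailTime, opponentJailTime
-- ===== Notes on version B (the rewrite author's own statement) =====
-- stated objective: idiomatic
-- what changed: Replaces the four-branch if/elif accumulator loop by building the move-pair list once and computing each total as a sum of payoff-table entries weighted by pair counts.
import Mathlib
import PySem

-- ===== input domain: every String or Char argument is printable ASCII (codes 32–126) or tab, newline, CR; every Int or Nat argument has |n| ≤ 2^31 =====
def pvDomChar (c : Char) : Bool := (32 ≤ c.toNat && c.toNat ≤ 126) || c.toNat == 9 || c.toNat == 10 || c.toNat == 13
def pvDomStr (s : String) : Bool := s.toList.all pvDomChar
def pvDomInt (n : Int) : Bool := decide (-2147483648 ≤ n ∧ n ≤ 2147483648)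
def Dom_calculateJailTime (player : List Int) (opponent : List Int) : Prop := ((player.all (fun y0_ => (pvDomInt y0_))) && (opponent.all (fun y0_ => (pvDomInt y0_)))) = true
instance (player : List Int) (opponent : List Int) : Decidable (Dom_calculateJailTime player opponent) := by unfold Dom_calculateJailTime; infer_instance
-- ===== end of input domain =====

-- B replaces the four-branch if/elif accumulator loop by a pair list plus a
-- payoff table: each total is a sum of table payoffs weighted by pair counts
-- (objective: more idiomatic; same O(n) cost).

-- ===== PORT A =====
def calculateJailTime (player : List Int) (opponent : List Int) : Int × Int :=
  (PySem.List.pyRange 0 player.length 1).foldl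
    (fun (st : Int × Int) i =>
      let p := PySem.List.pyGetD player i 0
      let o := PySem.List.pyGetD opponent i 0
      if p == o && p == 0 then (st.1 + 1, st.2 + 1)
      else if p == o && p == 1 then (st.1 + 10, st.2 + 10)
      else if p == 0 && o == 1 then (st.1 + 20, st.2 + 0)
      else if p == 1 && o == 0 then (st.1 + 0, st.2 + 20)
      else st) (0, 0)

-- ===== PORT B =====
-- the payoff dict of Source B as an association list (keys are distinct)
def pvPayoffTable : List ((Int × Int) × (Int × Int)) :=
  [((0, 0), (1, 1)), ((1, 1), (10, 10)), ((0, 1), (20, 0)), ((1, 0), (0, 20))]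

def calculateJailTime_alt (player : List Int) (opponent : List Int) : Int × Int :=
  let pairs := (PySem.List.pyRange 0 player.length 1).map
    (fun i => (PySem.List.pyGetD player i 0, PySem.List.pyGetD opponent i 0))
  ((pvPayoffTable.map (fun kv => (pairs.count kv.1 : Int) * kv.2.1)).sum,
   (pvPayoffTable.map (fun kv => (pairs.count kv.1 : Int) * kv.2.2)).sum)

-- ===== PRECONDITION & SPEC =====
-- A indexes opponent by every index of player, so it raises IndexError when
-- opponent is shorter than player; exactly those inputs are excluded.
def Pre_calculateJailTime (player : List Int) (opponent : List Int) : Prop :=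
  player.length ≤ opponent.length
instance (player : List Int) (opponent : List Int) : Decidable (Pre_calculateJailTime player opponent) := by unfold Pre_calculateJailTime; infer_instance

def pvWitness_calculateJailTime : List Int × List Int := ([0, 1, 1], [1, 1, 0])

def Spec_calculateJailTime (player : List Int) (opponent : List Int) (out : Int × Int) : Prop := out = calculateJailTime_alt player opponent
instance (player : List Int) (opponent : List Int) (out : Int × Int) : Decidable (Spec_calculateJailTime player opponent out) := by unfold Spec_calculateJailTime; infer_instance

-- ===== CLAIM (what is proved, stated in full; the proofs are below) =====
def Claim_equal_calculateJailTime : Prop := ∀ (player : List Int) (opponent : List Int), Dom_calculateJailTime player opponent → Pre_calculateJailTime player opponent → Spec_calculateJailTime player opponent (calculateJailTime player opponent)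

-- ===== LEMMAS AND PROOFS =====

-- A's loop step, phrased on a move pair (what the loop body does once the
-- index lookups are named).
def pvStep (st : Int × Int) (pr : Int × Int) : Int × Int :=
  if pr.1 == pr.2 && pr.1 == 0 then (st.1 + 1, st.2 + 1)
  else if pr.1 == pr.2 && pr.1 == 1 then (st.1 + 10, st.2 + 10)
  else if pr.1 == 0 && pr.2 == 1 then (st.1 + 20, st.2 + 0)
  else if pr.1 == 1 && pr.2 == 0 then (st.1 + 0, st.2 + 20)
  else st

lemma pvFold_counts (L : List (Int × Int)) : ∀ (a b : Int),
    L.foldl pvStep (a, b)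
      = (a + (L.count ((0 : Int), (0 : Int)) : Int) + 10 * (L.count (1, 1) : Int) + 20 * (L.count (0, 1) : Int),
         b + (L.count ((0 : Int), (0 : Int)) : Int) + 10 * (L.count (1, 1) : Int) + 20 * (L.count (1, 0) : Int)) := by
  induction L with
  | nil => intro a b; simp
  | cons hd tl ih =>
    intro a b
    obtain ⟨p, o⟩ := hd
    by_cases h00 : p = 0 ∧ o = 0
    · obtain ⟨rfl, rfl⟩ := h00
      simp [pvStep, ih]; push_cast; omega
    · by_cases h11 : p = 1 ∧ o = 1
      · obtain ⟨rfl, rfl⟩ := h11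
        simp [pvStep, ih]; push_cast; omega
      · by_cases h01 : p = 0 ∧ o = 1
        · obtain ⟨rfl, rfl⟩ := h01
          simp [pvStep, ih]; push_cast; omega
        · by_cases h10 : p = 1 ∧ o = 0
          · obtain ⟨rfl, rfl⟩ := h10
            simp [pvStep, ih]; push_cast; omega
          · have e00 : ((p, o) : Int × Int) ≠ (0, 0) := by
              intro h; exact h00 ⟨congrArg Prod.fst h, congrArg Prod.snd h⟩
            have e11 : ((p, o) : Int × Int) ≠ (1, 1) := by
              intro h; exact h11 ⟨congrArg Prod.fst h, congrArg Prod.snd h⟩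
            have e01 : ((p, o) : Int × Int) ≠ (0, 1) := by
              intro h; exact h01 ⟨congrArg Prod.fst h, congrArg Prod.snd h⟩
            have e10 : ((p, o) : Int × Int) ≠ (1, 0) := by
              intro h; exact h10 ⟨congrArg Prod.fst h, congrArg Prod.snd h⟩
            have step_id : pvStep (a, b) (p, o) = (a, b) := by
              simp only [pvStep]
              have c1 : ¬ (p = o ∧ p = 0) := fun ⟨h1, h2⟩ => h00 ⟨h2, h1 ▸ h2⟩
              have c2 : ¬ (p = o ∧ p = 1) := fun ⟨h1, h2⟩ => h11 ⟨h2, h1 ▸ h2⟩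
              have c3 : ¬ (p = 0 ∧ o = 1) := h01
              have c4 : ¬ (p = 1 ∧ o = 0) := h10
              simp only [beq_iff_eq, Bool.and_eq_true]
              split_ifs with i1 i2 i3 i4 <;> first
                | rfl
                | (exact absurd ⟨by simpa using i1.1, by simpa using i1.2⟩ c1)
                | (exact absurd ⟨by simpa using i2.1, by simpa using i2.2⟩ c2)
                | (exact absurd ⟨by simpa using i3.1, by simpa using i3.2⟩ c3)
                | (exact absurd ⟨by simpa using i4.1, by simpa using i4.2⟩ c4)
            rw [List.foldl_cons, step_id, ih]
            simp [e00, e11, e01, e10]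

-- ===== VERDICT (by name: the statement is the Claim_ definition above) =====
theorem calculateJailTime_spec : Claim_equal_calculateJailTime := by
  intro player opponent _ _
  unfold Spec_calculateJailTime calculateJailTime calculateJailTime_alt
  have hA : (PySem.List.pyRange 0 (↑player.length) 1).foldl
      (fun (st : Int × Int) i =>
        let p := PySem.List.pyGetD player i 0
        let o := PySem.List.pyGetD opponent i 0
        if p == o && p == 0 then (st.1 + 1, st.2 + 1)
        else if p == o && p == 1 then (st.1 + 10, st.2 + 10)
        else if p == 0 && o == 1 then (st.1 + 20, st.2 + 0)
        else if p == 1 && o == 0 then (st.1 + 0, st.2 + 20)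
        else st) (0, 0)
    = (PySem.List.pyRange 0 (↑player.length) 1).foldl
      (fun st i => pvStep st (PySem.List.pyGetD player i 0, PySem.List.pyGetD opponent i 0)) (0, 0) := rfl
  rw [hA]
  have := pvFold_counts ((PySem.List.pyRange 0 (↑player.length) 1).map
    (fun i => (PySem.List.pyGetD player i 0, PySem.List.pyGetD opponent i 0))) 0 0
  rw [List.foldl_map] at this
  rw [this]
  simp only [pvPayoffTable, List.map, List.sum_cons, List.sum_nil, Prod.mk.injEq]
  constructor <;> ring
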